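-- pv_equiv track=rewrite | github.com/KalleFruitema/advent-of-code | 2023/dag_10/dag_10.py | count_crossovers_vert
-- ===== SOURCE A (Python) =====
-- def count_crossovers_vert(side: list[str]):
--     on_pipe = ""
--     crossovers = 0
--     for char in side:
--         if char == "-":
--             crossovers += 1
--         elif char in "F7":
--             on_pipe = char
--         elif char in "LJ" and on_pipe:
--             if char == "L" and on_pipe == "7" or\
--                 char == "J" and on_pipe == "F":
--                     crossovers += 1
--             on_pipe = ""
--     return crossovers
-- ===== SOURCE B (Python) =====
-- def count_crossovers_vert(side: list[str]):
--     # A crossover happens exactly when an L/J bend immediately follows (among the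
--     # state-changing entries) a pending "7"/"F": so filter to the state-changing
--     # entries and count matching adjacent pairs, plus the dashes.
--     bends = [c for c in side if c in "F7" or c in "LJ"]
--     hits = sum(1 for p, c in zip(bends, bends[1:])
--                if (p, c) in (("7", "L"), ("F", "J")))
--     return side.count("-") + hits
-- ===== Notes on version B (the rewrite author's own statement) =====
-- stated objective: alternative
-- what changed: B replaces A's single-pass state machine (a pending-corner variable updated element by element) with a stateless formulation: filter the list to the state-changing entries, count the adjacent pairs in that filtered list where an L follows a pending 7 or a J follows a pending F, and add one dash count; correct because every state-changing entry leaves the pending state determined by that entry alone.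
import Mathlib
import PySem

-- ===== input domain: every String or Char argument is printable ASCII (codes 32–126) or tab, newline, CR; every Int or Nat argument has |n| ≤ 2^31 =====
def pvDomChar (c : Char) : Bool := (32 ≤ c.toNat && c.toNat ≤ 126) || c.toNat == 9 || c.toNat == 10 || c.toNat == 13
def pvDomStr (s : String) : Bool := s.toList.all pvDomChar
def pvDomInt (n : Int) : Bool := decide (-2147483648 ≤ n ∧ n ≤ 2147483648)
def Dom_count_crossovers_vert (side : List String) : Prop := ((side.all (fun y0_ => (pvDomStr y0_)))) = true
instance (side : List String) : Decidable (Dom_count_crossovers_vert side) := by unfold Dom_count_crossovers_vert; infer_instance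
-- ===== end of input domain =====

-- B replaces A's pending-corner state machine with a stateless pass: filter to the
-- state-changing entries and count matching adjacent pairs, plus a dash count (objective: alternative).


-- ===== PORT A =====
-- one interleaved pass; state = (on_pipe, crossovers)
def pvStepA (st : String × Int) (char : String) : String × Int :=
  if char == "-" then (st.1, st.2 + 1)
  else if PySem.Str.isIn char "F7" then (char, st.2)
  else if PySem.Str.isIn char "LJ" && !(st.1 == "") then
    (if (char == "L" && st.1 == "7") || (char == "J" && st.1 == "F")
     then ("", st.2 + 1) else ("", st.2))
  else st

def count_crossovers_vert (side : List String) : Int :=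
  (side.foldl pvStepA ("", 0)).2

-- ===== PORT B =====
-- bends = [c for c in side if c in "F7" or c in "LJ"]
def pvIsBend (c : String) : Bool := PySem.Str.isIn c "F7" || PySem.Str.isIn c "LJ"

def count_crossovers_vert_alt (side : List String) : Int :=
  let bends := side.filter pvIsBend
  -- sum(1 for p, c in zip(bends, bends[1:]) if (p, c) in (("7","L"), ("F","J")))
  let hits : Nat := (bends.zip bends.tail).countP
      (fun pc => pc == ("7", "L") || pc == ("F", "J"))
  (PySem.List.count side "-" : Int) + (hits : Int)

-- ===== PRECONDITION & SPEC =====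
def Spec_count_crossovers_vert (side : List String) (out : Int) : Prop := out = count_crossovers_vert_alt side
instance (side : List String) (out : Int) : Decidable (Spec_count_crossovers_vert side out) := by unfold Spec_count_crossovers_vert; infer_instance

-- ===== CLAIM (what is proved, stated in full; the proofs are below) =====
def Claim_equal_count_crossovers_vert : Prop := ∀ (side : List String), Dom_count_crossovers_vert side → Spec_count_crossovers_vert side (count_crossovers_vert side)

-- ===== LEMMAS AND PROOFS =====

-- the pending state after processing a state-changing entry c, independent of the previous state
def pvNext (c : String) : String := if PySem.Str.isIn c "F7" then c else ""

-- whether an entry c fires a crossover given pending state s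
def pvHit (s c : String) : Bool := (s == "7" && c == "L") || (s == "F" && c == "J")

-- crossovers produced by processing the bend list bs starting from pending state s
def pvG (s : String) (bs : List String) : Nat :=
  match bs with
  | [] => 0
  | c :: t => (if pvHit s c then 1 else 0) + pvG (pvNext c) t

-- B's pair count
def pvZ (bs : List String) : Nat :=
  (bs.zip bs.tail).countP (fun pc => pc == ("7", "L") || pc == ("F", "J"))

-- contribution of the head of bs against pending state s
def pvHead (s : String) (bs : List String) : Nat :=
  match bs with
  | [] => 0
  | c :: _ => if pvHit s c then 1 else 0

lemma pvPred_eq (a b : String) :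
    ((a, b) == ("7", "L") || (a, b) == ("F", "J")) = pvHit a b := rfl

lemma pvHit_iff (s c : String) :
    pvHit s c = true ↔ (c = "L" ∧ s = "7") ∨ (c = "J" ∧ s = "F") := by
  simp [pvHit]; tauto

lemma pvHit_next (c c' : String) : pvHit (pvNext c) c' = pvHit c c' := by
  unfold pvNext
  by_cases h : PySem.Str.isIn c "F7" = true
  · simp only [h, if_true]
  · have h7 : c ≠ "7" := by rintro rfl; exact h (by decide)
    have hF : c ≠ "F" := by rintro rfl; exact h (by decide)
    simp only [h, if_false, Bool.false_eq_true]
    simp [pvHit, h7, hF]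

lemma pvHit_empty (c : String) : pvHit "" c = false := by
  simp [pvHit]

lemma pvG_eq_pvZ : ∀ (bs : List String) (s : String),
    pvG s bs = pvZ bs + pvHead s bs := by
  intro bs
  induction bs with
  | nil => intro s; simp [pvG, pvZ, pvHead]
  | cons c t ih =>
      intro s
      have hz : pvZ (c :: t) = pvZ t + pvHead c t := by
        cases t with
        | nil => simp [pvZ, pvHead]
        | cons c' t' =>
            simp only [pvZ, pvHead, List.tail_cons, List.zip_cons_cons,
              List.countP_cons, pvPred_eq]
            by_cases h : pvHit c c' = true <;> simp [h] <;> omega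
      have hstep : pvG s (c :: t) = (if pvHit s c then 1 else 0) + pvG (pvNext c) t := rfl
      rw [hstep, ih (pvNext c), hz]
      have hh : pvHead (pvNext c) t = pvHead c t := by
        cases t with
        | nil => rfl
        | cons c' t' => simp [pvHead, pvHit_next]
      rw [hh]
      show _ = _ + pvHead s (c :: t)
      simp only [pvHead]
      omega

-- A's fold, characterised: dashes plus the bend-list crossovers
lemma pvA_char : ∀ (side : List String) (st : String × Int),
    (side.foldl pvStepA st).2 =
      st.2 + (side.count "-" : Int) + (pvG st.1 (side.filter pvIsBend) : Int) := by
  intro side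
  induction side with
  | nil => intro st; simp [pvG]
  | cons ch t ih =>
      intro st
      rw [List.foldl_cons]
      by_cases hd : ch = "-"
      · subst hd
        have hA : pvStepA st "-" = (st.1, st.2 + 1) := by unfold pvStepA; simp
        have hB : pvIsBend "-" = false := by decide
        rw [hA, ih]
        simp only [List.filter_cons, hB, Bool.false_eq_true, if_false,
          List.count_cons, BEq.rfl, if_true]
        push_cast; ring
      · have hne : (ch == "-") = false := by simp [hd]
        have hcnt : ((ch :: t).count "-" : Int) = (t.count "-" : Int) := by
          simp [List.count_cons, hne]
        by_cases hF7 : PySem.Str.isIn ch "F7" = true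
        · have hA : pvStepA st ch = (ch, st.2) := by
            unfold pvStepA; rw [hne, hF7]; simp
          have hb : pvIsBend ch = true := by unfold pvIsBend; rw [hF7]; simp
          have hL : ch ≠ "L" := by rintro rfl; exact absurd hF7 (by decide)
          have hJ : ch ≠ "J" := by rintro rfl; exact absurd hF7 (by decide)
          have hhit : pvHit st.1 ch = false := by simp [pvHit, hL, hJ]
          have hnx : pvNext ch = ch := by unfold pvNext; rw [hF7]; simp
          rw [hA, ih]
          simp only [List.filter_cons, hb, if_true, pvG, hhit, Bool.false_eq_true,
            if_false, hnx, hcnt]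
          push_cast; ring
        · have hF7' : PySem.Str.isIn ch "F7" = false := by simpa using hF7
          have hnx : pvNext ch = "" := by unfold pvNext; rw [hF7']; simp
          by_cases hLJ : PySem.Str.isIn ch "LJ" = true
          · have hb : pvIsBend ch = true := by unfold pvIsBend; rw [hLJ]; simp
            by_cases hs : st.1 = ""
            · have hA : pvStepA st ch = st := by
                unfold pvStepA; rw [hne, hF7', hLJ]; simp [hs]
              have hhit : pvHit st.1 ch = false := by simp [pvHit, hs]
              rw [hA, ih]
              simp only [List.filter_cons, hb, if_true, pvG, hhit,
                Bool.false_eq_true, if_false, hnx, hcnt, hs, pvHit_empty, Nat.zero_add]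
            · have hA : pvStepA st ch =
                  ("", st.2 + (if pvHit st.1 ch then 1 else 0)) := by
                unfold pvStepA
                rw [hne, hF7', hLJ]
                have hs' : (st.1 == "") = false := by simp [hs]
                rw [hs']
                simp only [Bool.false_eq_true, if_false, Bool.not_false,
                  Bool.and_true, if_true]
                by_cases hh : pvHit st.1 ch = true
                · rcases (pvHit_iff st.1 ch).mp hh with ⟨h1, h2⟩ | ⟨h1, h2⟩ <;>
                    simp [h1, h2, hh, pvHit]
                · have hh' : pvHit st.1 ch = false := by simpa using hh
                  have hc : ((ch == "L" && st.1 == "7") || (ch == "J" && st.1 == "F")) = false := by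
                    by_contra hcc
                    have : pvHit st.1 ch = true := by
                      apply (pvHit_iff st.1 ch).mpr
                      simp only [Bool.not_eq_false, Bool.or_eq_true, Bool.and_eq_true,
                        beq_iff_eq] at hcc
                      tauto
                    simp [this] at hh'
                  rw [hc]
                  simp [hh']
              rw [hA, ih]
              simp only [List.filter_cons, hb, if_true, pvG, hnx, hcnt]
              by_cases hh : pvHit st.1 ch = true <;> simp [hh] <;> push_cast <;> ring
          · have hLJ' : PySem.Str.isIn ch "LJ" = false := by simpa using hLJ
            have hA : pvStepA st ch = st := by
              unfold pvStepA; rw [hne, hF7', hLJ']; simp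
            have hb : pvIsBend ch = false := by
              unfold pvIsBend; rw [hF7', hLJ']; simp
            rw [hA, ih]
            simp only [List.filter_cons, hb, Bool.false_eq_true, if_false, hcnt]

-- ===== VERDICT (by name: the statement is the Claim_ definition above) =====
theorem count_crossovers_vert_spec : Claim_equal_count_crossovers_vert := by
  intro side _
  unfold Spec_count_crossovers_vert count_crossovers_vert count_crossovers_vert_alt
  rw [pvA_char side ("", 0)]
  have hg := pvG_eq_pvZ (side.filter pvIsBend) ""
  have hmz : pvHead "" (side.filter pvIsBend) = 0 := by
    cases side.filter pvIsBend with
    | nil => rfl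
    | cons c t => simp [pvHead, pvHit_empty]
  rw [hmz] at hg
  simp only [PySem.List.count_eq, pvZ] at *
  rw [hg]
  push_cast; ring
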